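-- pv_equiv track=rewrite | github.com/lseaJK/HyperEventGraph | src/core/pattern_layer_manager.py | _infer_domain_from_types
-- ===== SOURCE A (Python) =====
-- from typing import Dict, List, Any, Optional, Tuple, Set
--
-- def _infer_domain_from_types(event_types: List[str]) -> str:
--     """从事件类型推断领域"""
--     business_types = {"business_cooperation", "business_merger", "investment", "partnership"}
--     tech_types = {"product_launch", "technology_breakthrough"}
--
--     if any(t in business_types for t in event_types):
--         return "business"
--     elif any(t in tech_types for t in event_types):
--         return "technology"
--     else:
--         return "general"
-- ===== SOURCE B (Python) =====
-- def _infer_domain_from_types(event_types):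
--     """从事件类型推断领域"""
--     rank = {
--         "business_cooperation": 2,
--         "business_merger": 2,
--         "investment": 2,
--         "partnership": 2,
--         "product_launch": 1,
--         "technology_breakthrough": 1,
--     }
--     best = 0
--     for t in event_types:
--         r = rank.get(t, 0)
--         if r > best:
--             best = r
--     return ("general", "technology", "business")[best]
-- ===== Notes on version B (the rewrite author's own statement) =====
-- stated objective: alternative
-- what changed: Replaces A's two short-circuit any-scans over category sets by a numeric-priority reduction: each event type is mapped to a rank (business=2, technology=1, unknown=0), one pass keeps the running maximum rank, and the label is read off by indexing a tuple with that maximum — no membership scans or branch chain over categories.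
import Mathlib
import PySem

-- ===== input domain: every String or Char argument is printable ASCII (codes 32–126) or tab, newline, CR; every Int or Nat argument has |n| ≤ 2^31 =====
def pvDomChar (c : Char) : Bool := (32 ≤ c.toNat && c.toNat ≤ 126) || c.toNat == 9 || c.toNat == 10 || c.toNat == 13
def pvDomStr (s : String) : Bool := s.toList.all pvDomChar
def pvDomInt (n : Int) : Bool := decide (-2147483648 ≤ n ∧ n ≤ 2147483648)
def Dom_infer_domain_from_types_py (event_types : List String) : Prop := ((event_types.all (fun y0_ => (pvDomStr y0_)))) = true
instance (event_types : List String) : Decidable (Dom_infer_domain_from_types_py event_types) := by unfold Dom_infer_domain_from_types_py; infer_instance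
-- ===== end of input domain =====

-- B replaces A's two short-circuit any-scans by a numeric-priority rank reduction:
-- one pass keeping the maximum rank (business=2, technology=1, unknown=0), then the
-- label is read off by indexing a tuple with that maximum (objective: alternative, same cost).


-- ===== PORT A =====
-- Literal port of A: two short-circuit `any` membership scans over two set literals.
def infer_domain_from_types_py (event_types : List String) : String :=
  let business_types : PySem.Set String :=
    PySem.Set.ofList ["business_cooperation", "business_merger", "investment", "partnership"]
  let tech_types : PySem.Set String := PySem.Set.ofList ["product_launch", "technology_breakthrough"]
  if event_types.any (fun t => PySem.Set.contains business_types t) then "business"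
  else if event_types.any (fun t => PySem.Set.contains tech_types t) then "technology"
  else "general"

-- ===== PORT B =====
-- B: rank dict (business=2, technology=1); one pass keeping the running maximum rank;
-- the label is the tuple ("general","technology","business") indexed by that maximum.
def pvRank : PySem.Dict String Nat :=
  PySem.Dict.ofList
    [("business_cooperation", 2), ("business_merger", 2),
     ("investment", 2), ("partnership", 2),
     ("product_launch", 1), ("technology_breakthrough", 1)]

def infer_domain_from_types_py_alt (event_types : List String) : String :=
  let best : Nat := event_types.foldl
    (fun best t =>
      let r := PySem.Dict.getD pvRank t 0
      if r > best then r else best) 0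
  -- tuple indexing ("general","technology","business")[best]; best ∈ {0,1,2} by construction,
  -- so the lookup always hits (the getD default is unreachable)
  (PySem.List.pyGetD ["general", "technology", "business"] (Int.ofNat best) "general")

-- ===== PRECONDITION & SPEC =====
def Spec_infer_domain_from_types_py (event_types : List String) (out : String) : Prop := out = infer_domain_from_types_py_alt event_types
instance (event_types : List String) (out : String) : Decidable (Spec_infer_domain_from_types_py event_types out) := by unfold Spec_infer_domain_from_types_py; infer_instance

-- ===== CLAIM (what is proved, stated in full; the proofs are below) =====
def Claim_equal_infer_domain_from_types_py : Prop := ∀ (event_types : List String), Dom_infer_domain_from_types_py event_types → Spec_infer_domain_from_types_py event_types (infer_domain_from_types_py event_types)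

-- ===== LEMMAS AND PROOFS =====

-- rank lookup = 2 exactly on A's business set
theorem pv_rank_two (t : String) :
    (PySem.Dict.getD pvRank t 0 == 2)
      = PySem.Set.contains (PySem.Set.ofList
          ["business_cooperation", "business_merger", "investment", "partnership"]) t := by
  have hs : PySem.Set.ofList ["business_cooperation", "business_merger", "investment", "partnership"]
      = ["business_cooperation", "business_merger", "investment", "partnership"] := by decide
  rw [hs]
  have h : pvRank = PySem.Dict.mk
    [("business_cooperation", 2), ("business_merger", 2),
     ("investment", 2), ("partnership", 2),
     ("product_launch", 1), ("technology_breakthrough", 1)] := by decide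
  rw [h]
  by_cases h1 : "business_cooperation" = t
  · subst h1; decide
  by_cases h2 : "business_merger" = t
  · subst h2; decide
  by_cases h3 : "investment" = t
  · subst h3; decide
  by_cases h4 : "partnership" = t
  · subst h4; decide
  by_cases h5 : "product_launch" = t
  · subst h5; decide
  by_cases h6 : "technology_breakthrough" = t
  · subst h6; decide
  have e1 : ("business_cooperation" == t) = false := by simp [h1]
  have e2 : ("business_merger" == t) = false := by simp [h2]
  have e3 : ("investment" == t) = false := by simp [h3]
  have e4 : ("partnership" == t) = false := by simp [h4]
  have e5 : ("product_launch" == t) = false := by simp [h5]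
  have e6 : ("technology_breakthrough" == t) = false := by simp [h6]
  simp [PySem.Dict.getD, PySem.Dict.get?, List.find?,
        e1, e2, e3, e4, e5, e6, Ne.symm h1, Ne.symm h2, Ne.symm h3, Ne.symm h4]

-- rank lookup = 1 exactly on A's tech set
theorem pv_rank_one (t : String) :
    (PySem.Dict.getD pvRank t 0 == 1)
      = PySem.Set.contains (PySem.Set.ofList ["product_launch", "technology_breakthrough"]) t := by
  have hs : PySem.Set.ofList ["product_launch", "technology_breakthrough"]
      = ["product_launch", "technology_breakthrough"] := by decide
  rw [hs]
  have h : pvRank = PySem.Dict.mk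
    [("business_cooperation", 2), ("business_merger", 2),
     ("investment", 2), ("partnership", 2),
     ("product_launch", 1), ("technology_breakthrough", 1)] := by decide
  rw [h]
  by_cases h1 : "business_cooperation" = t
  · subst h1; decide
  by_cases h2 : "business_merger" = t
  · subst h2; decide
  by_cases h3 : "investment" = t
  · subst h3; decide
  by_cases h4 : "partnership" = t
  · subst h4; decide
  by_cases h5 : "product_launch" = t
  · subst h5; decide
  by_cases h6 : "technology_breakthrough" = t
  · subst h6; decide
  have e1 : ("business_cooperation" == t) = false := by simp [h1]
  have e2 : ("business_merger" == t) = false := by simp [h2]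
  have e3 : ("investment" == t) = false := by simp [h3]
  have e4 : ("partnership" == t) = false := by simp [h4]
  have e5 : ("product_launch" == t) = false := by simp [h5]
  have e6 : ("technology_breakthrough" == t) = false := by simp [h6]
  simp [PySem.Dict.getD, PySem.Dict.get?, List.find?,
        e1, e2, e3, e4, e5, e6, Ne.symm h5, Ne.symm h6]

theorem pv_rank_le_two (t : String) : PySem.Dict.getD pvRank t 0 ≤ 2 := by
  have h : pvRank = PySem.Dict.mk
    [("business_cooperation", 2), ("business_merger", 2),
     ("investment", 2), ("partnership", 2),
     ("product_launch", 1), ("technology_breakthrough", 1)] := by decide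
  rw [h]
  by_cases h1 : "business_cooperation" = t
  · subst h1; decide
  by_cases h2 : "business_merger" = t
  · subst h2; decide
  by_cases h3 : "investment" = t
  · subst h3; decide
  by_cases h4 : "partnership" = t
  · subst h4; decide
  by_cases h5 : "product_launch" = t
  · subst h5; decide
  by_cases h6 : "technology_breakthrough" = t
  · subst h6; decide
  have e1 : ("business_cooperation" == t) = false := by simp [h1]
  have e2 : ("business_merger" == t) = false := by simp [h2]
  have e3 : ("investment" == t) = false := by simp [h3]
  have e4 : ("partnership" == t) = false := by simp [h4]
  have e5 : ("product_launch" == t) = false := by simp [h5]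
  have e6 : ("technology_breakthrough" == t) = false := by simp [h6]
  simp [PySem.Dict.getD, PySem.Dict.get?, List.find?,
        e1, e2, e3, e4, e5, e6]

-- the "score" of a list: A's branch chain expressed numerically
def pvScore (l : List String) : Nat :=
  if l.any (fun t => PySem.Dict.getD pvRank t 0 == 2) then 2
  else if l.any (fun t => PySem.Dict.getD pvRank t 0 == 1) then 1
  else 0

-- B's running-maximum fold computes max of the start value and the score
theorem pv_fold_eq_score (l : List String) (m : Nat) :
    l.foldl (fun best t =>
      let r := PySem.Dict.getD pvRank t 0
      if r > best then r else best) m = max m (pvScore l) := by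
  induction l generalizing m with
  | nil => simp [pvScore]
  | cons x xs ih =>
    simp only [List.foldl_cons, ih, pvScore, List.any_cons]
    have hx := pv_rank_le_two x
    have hz : PySem.Dict.getD pvRank x 0 = 0 ∨ PySem.Dict.getD pvRank x 0 = 1 ∨
        PySem.Dict.getD pvRank x 0 = 2 := by omega
    rcases hz with h | h | h <;> simp [h] <;> split_ifs <;> omega

-- ===== VERDICT (by name: the statement is the Claim_ definition above) =====
theorem infer_domain_from_types_py_spec : Claim_equal_infer_domain_from_types_py := by
  intro l _
  unfold Spec_infer_domain_from_types_py infer_domain_from_types_py infer_domain_from_types_py_alt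
  simp only [pv_fold_eq_score, Nat.max_eq_right (Nat.zero_le _), pvScore,
             pv_rank_two, pv_rank_one]
  split_ifs <;> decide
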